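-- pv_equiv track=rewrite | github.com/jben-hun/scripts | detector_benchmark/util.py | heightFilter
-- ===== SOURCE A (Python) =====
-- def heightFilter(l_,minHeight,maxHeight,labels=None):
--     l = l_[:]
--
--     if labels is not None:
--         l = [ e for i,e in enumerate(l) if labels[i] != 0 ]
--
--     if minHeight is not None:
--         l = [ e for e in l if e[3]-e[1]+1 >= minHeight ]
--     if maxHeight is not None:
--         l = [ e for e in l if e[3]-e[1]+1 <= maxHeight ]
--
--     return l
-- ===== SOURCE B (Python) =====
-- def heightFilter(l_, minHeight, maxHeight, labels=None):
--     out = []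
--     for i, e in enumerate(l_):
--         if labels is not None and labels[i] == 0:
--             continue
--         h = e[3] - e[1] + 1
--         if minHeight is not None and h < minHeight:
--             continue
--         if maxHeight is not None and h > maxHeight:
--             continue
--         out.append(e)
--     return out
-- ===== Notes on version B (the rewrite author's own statement) =====
-- stated objective: simpler
-- what changed: Replaces A's list copy plus three sequential filtering passes (each rebuilding the list) with one enumerate loop that computes the height once per box and applies all active predicates in a single traversal.
import Mathlib
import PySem

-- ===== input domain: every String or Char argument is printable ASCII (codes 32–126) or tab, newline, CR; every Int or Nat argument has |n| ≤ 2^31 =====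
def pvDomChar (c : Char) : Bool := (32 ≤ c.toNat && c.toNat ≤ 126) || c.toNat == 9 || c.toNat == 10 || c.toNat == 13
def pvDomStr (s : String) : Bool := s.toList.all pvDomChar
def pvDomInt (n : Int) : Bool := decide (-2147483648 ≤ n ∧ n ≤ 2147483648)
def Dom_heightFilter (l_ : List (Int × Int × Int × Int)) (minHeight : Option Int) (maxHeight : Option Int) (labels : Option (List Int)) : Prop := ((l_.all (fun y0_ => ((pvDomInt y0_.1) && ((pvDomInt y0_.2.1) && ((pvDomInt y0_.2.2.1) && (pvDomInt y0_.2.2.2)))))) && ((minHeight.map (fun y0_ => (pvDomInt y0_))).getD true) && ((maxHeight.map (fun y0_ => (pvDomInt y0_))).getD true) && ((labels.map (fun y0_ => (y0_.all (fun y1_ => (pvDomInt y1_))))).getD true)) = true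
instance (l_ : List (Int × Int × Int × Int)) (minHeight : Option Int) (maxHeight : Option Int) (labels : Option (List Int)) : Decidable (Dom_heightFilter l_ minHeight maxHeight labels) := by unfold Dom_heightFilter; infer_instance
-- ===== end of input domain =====

-- B replaces A's list copy + three sequential filtering passes by a single enumerate loop
-- computing the height once per box (objective: simpler, one traversal instead of up to three).


-- ===== PORT A =====
-- labels[i] (i ≥ 0, from enumerate) is ported with pyGetD; Pre_ keeps every index in range.
def heightFilter (l_ : List (Int × Int × Int × Int)) (minHeight : Option Int) (maxHeight : Option Int) (labels : Option (List Int)) : List (Int × Int × Int × Int) :=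
  let l0 := l_
  let l1 := match labels with
    | none => l0
    | some lab => ((PySem.List.enumerate l0 0).filter (fun p => decide (PySem.List.pyGetD lab p.1 0 ≠ 0))).map (·.2)
  let l2 := match minHeight with
    | none => l1
    | some m => l1.filter (fun e => decide (e.2.2.2 - e.2.1 + 1 ≥ m))
  let l3 := match maxHeight with
    | none => l2
    | some m => l2.filter (fun e => decide (e.2.2.2 - e.2.1 + 1 ≤ m))
  l3

-- ===== PORT B =====
def heightFilter_alt (l_ : List (Int × Int × Int × Int)) (minHeight : Option Int) (maxHeight : Option Int) (labels : Option (List Int)) : List (Int × Int × Int × Int) :=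
  (PySem.List.enumerate l_ 0).foldl (fun out p =>
    if (match labels with
        | some lab => decide (PySem.List.pyGetD lab p.1 0 = 0)
        | none => false) then out
    else
      let h := p.2.2.2.2 - p.2.2.1 + 1
      if (match minHeight with | some m => decide (h < m) | none => false) then out
      else if (match maxHeight with | some m => decide (m < h) | none => false) then out
      else out ++ [p.2]) []

-- ===== PRECONDITION & SPEC =====
-- Pre_ excludes exactly the inputs on which Python A raises IndexError: labels given but
-- shorter than l_ (the label pass indexes labels[i] for every position i of l_).
def Pre_heightFilter (l_ : List (Int × Int × Int × Int)) (minHeight : Option Int) (maxHeight : Option Int) (labels : Option (List Int)) : Prop :=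
  ((labels.map (fun lab => decide (l_.length ≤ lab.length))).getD true) = true
instance (l_ : List (Int × Int × Int × Int)) (minHeight : Option Int) (maxHeight : Option Int) (labels : Option (List Int)) : Decidable (Pre_heightFilter l_ minHeight maxHeight labels) := by unfold Pre_heightFilter; infer_instance
def pvWitness_heightFilter : (List (Int × Int × Int × Int)) × Option Int × Option Int × Option (List Int) :=
  ([(0, 1, 4, 5), (2, 0, 3, 9)], some 3, some 10, some [1, 0])

def Spec_heightFilter (l_ : List (Int × Int × Int × Int)) (minHeight : Option Int) (maxHeight : Option Int) (labels : Option (List Int)) (out : List (Int × Int × Int × Int)) : Prop := out = heightFilter_alt l_ minHeight maxHeight labels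
instance (l_ : List (Int × Int × Int × Int)) (minHeight : Option Int) (maxHeight : Option Int) (labels : Option (List Int)) (out : List (Int × Int × Int × Int)) : Decidable (Spec_heightFilter l_ minHeight maxHeight labels out) := by unfold Spec_heightFilter; infer_instance

-- ===== CLAIM (what is proved, stated in full; the proofs are below) =====
def Claim_equal_heightFilter : Prop := ∀ (l_ : List (Int × Int × Int × Int)) (minHeight : Option Int) (maxHeight : Option Int) (labels : Option (List Int)), Dom_heightFilter l_ minHeight maxHeight labels → Pre_heightFilter l_ minHeight maxHeight labels → Spec_heightFilter l_ minHeight maxHeight labels (heightFilter l_ minHeight maxHeight labels)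

-- ===== LEMMAS AND PROOFS =====

-- combined height predicate (min/max passes) and full per-pair predicate both sides reduce to
def pvQ (mn mx : Option Int) (e : Int × Int × Int × Int) : Bool :=
  !(match mn with | some m => decide (e.2.2.2 - e.2.1 + 1 < m) | none => false)
  && !(match mx with | some m => decide (m < e.2.2.2 - e.2.1 + 1) | none => false)

def pvKeep (mn mx : Option Int) (labels : Option (List Int)) (p : Int × (Int × Int × Int × Int)) : Bool :=
  !(match labels with
    | some lab => decide (PySem.List.pyGetD lab p.1 0 = 0)
    | none => false)
  && pvQ mn mx p.2

theorem heightFilter_alt_eq (l_ : List (Int × Int × Int × Int)) (mn mx : Option Int) (labels : Option (List Int)) :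
    heightFilter_alt l_ mn mx labels = ((PySem.List.enumerate l_ 0).filter (pvKeep mn mx labels)).map (·.2) := by
  unfold heightFilter_alt
  refine Eq.trans (PySem.List.foldl_congr_mem
      (g := fun out p => if pvKeep mn mx labels p then out ++ [p.2] else out) _ _ _ ?_) ?_
  · intro acc p _
    unfold pvKeep pvQ
    rcases labels with _ | lab <;> rcases mn with _ | m <;> rcases mx with _ | M <;>
      split_ifs <;> (try simp_all) <;> (try split_ifs) <;> first | rfl | omega
  · rw [PySem.List.foldl_append_if (p := pvKeep mn mx labels) (f := fun p => p.2)]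
    simp

theorem A_tail (xs : List (Int × Int × Int × Int)) (mn mx : Option Int) :
    (match mx with
     | none =>
        (match mn with
         | none => xs
         | some m => xs.filter (fun e => decide (e.2.2.2 - e.2.1 + 1 ≥ m)))
     | some M =>
        (match mn with
         | none => xs
         | some m => xs.filter (fun e => decide (e.2.2.2 - e.2.1 + 1 ≥ m))).filter
          (fun e => decide (e.2.2.2 - e.2.1 + 1 ≤ M)))
    = xs.filter (pvQ mn mx) := by
  rcases mn with _ | m <;> rcases mx with _ | M <;>
    simp only [List.filter_filter] <;>
    first
      | (symm
         rw [List.filter_eq_self]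
         intro e _
         simp [pvQ])
      | (symm
         apply List.filter_congr
         intro e _
         rw [Bool.eq_iff_iff]
         simp [pvQ]
         try omega)

theorem heightFilter_eq (l_ : List (Int × Int × Int × Int)) (mn mx : Option Int) (labels : Option (List Int)) :
    heightFilter l_ mn mx labels = ((PySem.List.enumerate l_ 0).filter (pvKeep mn mx labels)).map (·.2) := by
  unfold heightFilter
  rcases labels with _ | lab
  · simp only []
    rw [A_tail]
    rw [show pvKeep mn mx none = (pvQ mn mx ∘ fun p : Int × (Int × Int × Int × Int) => p.2) from
      funext fun p => by simp [pvKeep, Function.comp]]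
    rw [← List.filter_map, PySem.List.map_snd_enumerate]
  · simp only []
    rw [A_tail, List.filter_map, List.filter_filter]
    apply congrArg
    apply List.filter_congr
    intro p _
    simp [pvKeep, Function.comp, Bool.and_comm]

-- ===== VERDICT (by name: the statement is the Claim_ definition above) =====
theorem heightFilter_spec : Claim_equal_heightFilter := by
  intro l_ mn mx labels _ _
  unfold Spec_heightFilter
  rw [heightFilter_eq, heightFilter_alt_eq]
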